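-- pv_equiv track=rewrite | github.com/1CG11/Computational-Physics-2-Thermal-Creation-of-Solitons | Kinks_and_Creations.py | anti_kink_in_block
-- ===== SOURCE A (Python) =====
-- w_kink = 20                 # minimum width of kink (nodes)
--
-- h_kink = 0.5                # minimum height of a kink
--
-- def anti_kink_in_block( block, f ):
--     """
--     Determines if there is an anti-kink present in the block of 'f';
--     if it passes the width and height conditions.
--
--     Block: indices of 'f' where the sign of 'f' is constant
--     f : the current field configuration
--     """
--     deep_count = 0
--
--     # for each node
--     for i in block :
--
--         # if passes height requirement, incerase counter
--         if f[i] < - h_kink: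
--             deep_count += 1
--
--             # if passes width requirement, then there is an anti - kink
--             if deep_count >= w_kink:
--                 return True
--
--         # if fails height requirement, reset counter
--         else:
--             deep_count = 0
--
--     # if at end no anti - kink was detected, then there is no anti - kink
--     return False
-- ===== SOURCE B (Python) =====
-- w_kink = 20                 # minimum width of kink (nodes)
--
-- h_kink = 0.5                # minimum height of a kink
--
-- def anti_kink_in_block(block, f):
--     """Breaker-gap method: record the positions of every node that FAILS the
--     depth test ('breakers', with sentinels at both ends), then check whether
--     some gap between consecutive breakers spans at least w_kink nodes."""
--     breakers = [-1] + [j for j, i in enumerate(block) if not (f[i] < -h_kink)] + [len(block)]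
--     return any(b - a - 1 >= w_kink for a, b in zip(breakers, breakers[1:]))
-- ===== Notes on version B (the rewrite author's own statement) =====
-- stated objective: alternative
-- what changed: B first records the positions of all nodes failing the depth test (a breaker list with sentinels at both ends) and then checks whether any gap between consecutive breakers is at least w_kink, instead of A's single flat pass with a reset counter and early return.
import Mathlib
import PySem

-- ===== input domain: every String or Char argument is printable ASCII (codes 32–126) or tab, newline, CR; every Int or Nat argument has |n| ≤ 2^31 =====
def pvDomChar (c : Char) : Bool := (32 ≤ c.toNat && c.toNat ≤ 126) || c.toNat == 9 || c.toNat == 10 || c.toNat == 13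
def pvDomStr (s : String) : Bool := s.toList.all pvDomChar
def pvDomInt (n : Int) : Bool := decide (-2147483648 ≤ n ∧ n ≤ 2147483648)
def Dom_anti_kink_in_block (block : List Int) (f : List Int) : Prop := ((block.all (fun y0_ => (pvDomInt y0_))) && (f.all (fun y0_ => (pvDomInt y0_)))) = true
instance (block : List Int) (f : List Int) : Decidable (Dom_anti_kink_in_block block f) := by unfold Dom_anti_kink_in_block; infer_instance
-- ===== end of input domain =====

-- B records the positions of nodes that FAIL the depth test (breakers, with sentinels) and
-- checks the gaps between consecutive breakers, instead of A's flat pass with a reset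
-- counter; same cost, alternative decomposition. Equivalence on inputs whose indices are
-- all in range (Pre_), where neither Python raises.

-- ===== PORT A =====

-- 'f[i] < -h_kink' with h_kink = 0.5: for an integer value v this is v ≤ -1 (exact).
-- On an out-of-range index Python raises IndexError (pyGet? = none): excluded by Pre_;
-- the port returns false there only to stay total.
def akDeep (f : List Int) (i : Int) : Bool :=
  match PySem.List.pyGet? f i with
  | some v => decide (v ≤ -1)
  | none => false

-- A's loop: 'deep_count' accumulator, incremented/reset, early return at 20.
def akLoop (f : List Int) : List Int → Int → Bool
  | [], _ => false
  | i :: rest, deep_count =>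
    if akDeep f i then
      if deep_count + 1 ≥ 20 then true else akLoop f rest (deep_count + 1)
    else akLoop f rest 0

def anti_kink_in_block (block : List Int) (f : List Int) : Bool :=
  akLoop f block 0

-- ===== PORT B =====

-- the comprehension '[j for j, i in enumerate(block) if not (f[i] < -h_kink)]'
-- (j is the running enumerate counter)
def altBrk (f : List Int) : List Int → Int → List Int
  | [], _ => []
  | i :: rest, j =>
    if !(akDeep f i) then j :: altBrk f rest (j + 1) else altBrk f rest (j + 1)

def anti_kink_in_block_alt (block : List Int) (f : List Int) : Bool :=
  let breakers : List Int := -1 :: (altBrk f block 0 ++ [(block.length : Int)])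
  (breakers.zip breakers.tail).any (fun ab => decide (20 ≤ ab.2 - ab.1 - 1))

-- ===== PRECONDITION & SPEC =====
-- Both Pythons index f at elements of block, so Pre_ requires each index in Python range
-- (negative indices wrap). Slightly narrower than A's exact return set: A may return
-- True early, before ever reaching a later out-of-range index (see the cite).
def Pre_anti_kink_in_block (block : List Int) (f : List Int) : Prop :=
  ∀ i ∈ block, -(f.length : Int) ≤ i ∧ i < (f.length : Int)
instance (block : List Int) (f : List Int) : Decidable (Pre_anti_kink_in_block block f) := by
  unfold Pre_anti_kink_in_block; infer_instance

def pvWitness_anti_kink_in_block : List Int × List Int := ([0, -1, 1], [-1, 0])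

def Spec_anti_kink_in_block (block : List Int) (f : List Int) (out : Bool) : Prop := out = anti_kink_in_block_alt block f
instance (block : List Int) (f : List Int) (out : Bool) : Decidable (Spec_anti_kink_in_block block f out) := by unfold Spec_anti_kink_in_block; infer_instance

-- ===== CLAIM (what is proved, stated in full; the proofs are below) =====
def Claim_equal_anti_kink_in_block : Prop := ∀ (block : List Int) (f : List Int), Dom_anti_kink_in_block block f → Pre_anti_kink_in_block block f → Spec_anti_kink_in_block block f (anti_kink_in_block block f)

-- ===== LEMMAS AND PROOFS =====

theorem altBrk_cons (f : List Int) (i : Int) (rest : List Int) (j : Int) :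
    altBrk f (i :: rest) j =
      if !(akDeep f i) then j :: altBrk f rest (j + 1) else altBrk f rest (j + 1) := rfl

-- lengths (as Int) of the maximal deep-runs of the block, in order (always nonempty)
def runsB : List Bool → List Int
  | [] => [0]
  | d :: t => if d then ((runsB t).headI + 1) :: (runsB t).tail else 0 :: runsB t

theorem runsB_cons (ds : List Bool) : runsB ds = (runsB ds).headI :: (runsB ds).tail := by
  cases ds with
  | nil => rfl
  | cons d t => unfold runsB; split_ifs <;> rfl

theorem runsB_headI_nonneg (ds : List Bool) : 0 ≤ (runsB ds).headI := by
  induction ds with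
  | nil => norm_num [runsB]
  | cons d t ih =>
    unfold runsB
    split_ifs
    · simp only [List.headI_cons]; omega
    · simp only [List.headI_cons]; omega

-- the gap list of a breaker list
def gapsI (L : List Int) : List Int := (L.zip L.tail).map (fun ab => ab.2 - ab.1 - 1)

theorem gapsI_cons₂ (x y : Int) (t : List Int) :
    gapsI (x :: y :: t) = (y - x - 1) :: gapsI (y :: t) := by
  simp [gapsI]

-- B's breaker gaps are exactly the run lengths (first gap offset by the start data)
theorem gapsI_altBrk (f : List Int) : ∀ (bl : List Int) (j a : Int),
    gapsI (a :: (altBrk f bl j ++ [j + (bl.length : Int)])) =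
      (j - a - 1 + (runsB (bl.map (akDeep f))).headI) :: (runsB (bl.map (akDeep f))).tail := by
  intro bl
  induction bl with
  | nil =>
    intro j a
    simp [altBrk, gapsI, runsB]
  | cons i rest ih =>
    intro j a
    have hlen : j + ((i :: rest).length : Int) = (j + 1) + (rest.length : Int) := by
      simp only [List.length_cons]; push_cast; omega
    by_cases h : akDeep f i = true
    · rw [altBrk_cons, hlen]
      simp only [h, Bool.not_true, Bool.false_eq_true, if_false]
      rw [ih (j + 1) a]
      simp only [List.map_cons, runsB, h, if_true, List.headI_cons, List.tail_cons]
      rw [List.cons.injEq]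
      exact ⟨by omega, rfl⟩
    · rw [altBrk_cons, hlen]
      simp only [h, Bool.not_eq_true', if_pos]
      rw [List.cons_append, gapsI_cons₂, ih (j + 1) j]
      simp only [List.map_cons, runsB, h, Bool.false_eq_true, if_false,
        List.headI_cons, List.tail_cons]
      rw [List.cons.injEq]
      refine ⟨by omega, ?_⟩
      conv_rhs => rw [runsB_cons (rest.map (akDeep f))]
      rw [List.cons.injEq]
      exact ⟨by omega, rfl⟩

-- A's counter loop decides 'some run length reaches 20', counter credited to the first run
theorem akLoop_runs (f : List Int) : ∀ (bl : List Int) (c : Int), 0 ≤ c → c < 20 →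
    akLoop f bl c =
      (decide (20 ≤ c + (runsB (bl.map (akDeep f))).headI)
        || (runsB (bl.map (akDeep f))).tail.any (fun r => decide (20 ≤ r))) := by
  intro bl
  induction bl with
  | nil =>
    intro c h0 h20
    simp [akLoop, runsB]
    omega
  | cons i rest ih =>
    intro c h0 h20
    by_cases h : akDeep f i = true
    · rw [akLoop]
      simp only [h, if_true, List.map_cons, runsB, List.headI_cons, List.tail_cons]
      by_cases h1 : c + 1 ≥ 20
      · rw [if_pos h1]
        have hn := runsB_headI_nonneg (rest.map (akDeep f))
        symm
        rw [Bool.or_eq_true]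
        left
        rw [decide_eq_true_eq]
        omega
      · rw [if_neg h1, ih (c + 1) (by omega) (by omega)]
        congr 1
        rw [decide_eq_decide]
        omega
    · rw [akLoop]
      simp only [h, Bool.false_eq_true, if_false, List.map_cons, runsB,
        List.headI_cons, List.tail_cons]
      rw [ih 0 (by omega) (by omega)]
      have habs : (decide (20 ≤ c + (0:Int))) = false := by
        rw [decide_eq_false_iff_not]
        omega
      rw [habs, Bool.false_or]
      conv_rhs => rw [runsB_cons (rest.map (akDeep f))]
      rw [List.any_cons]
      congr 1
      rw [decide_eq_decide]
      omega

-- ===== VERDICT (by name: the statement is the Claim_ definition above) =====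
theorem anti_kink_in_block_spec : Claim_equal_anti_kink_in_block := by
  intro block f _ _
  unfold Spec_anti_kink_in_block anti_kink_in_block anti_kink_in_block_alt
  have hB : (((-1 :: (altBrk f block 0 ++ [(block.length : Int)])).zip
        ((-1 :: (altBrk f block 0 ++ [(block.length : Int)]))).tail).any
        (fun ab => decide (20 ≤ ab.2 - ab.1 - 1)))
      = (gapsI (-1 :: (altBrk f block 0 ++ [(block.length : Int)]))).any
          (fun g => decide (20 ≤ g)) := by
    simp only [gapsI, List.any_map]
    rfl
  rw [akLoop_runs f block 0 (by omega) (by omega)]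
  simp only []
  rw [hB]
  have h0 : (0 : Int) + (block.length : Int) = (block.length : Int) := by omega
  have hg := gapsI_altBrk f block 0 (-1)
  rw [h0] at hg
  rw [hg, List.any_cons]
  congr 2
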